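-- pv_equiv track=rewrite | github.com/MolfarUA/CodeWars_Solutions | 6 kyu/Last Survivors Ep.3/solution.py | last_survivors
-- ===== SOURCE A (Python) =====
-- def last_survivors(arr, nums):
--     survivivors = list()
--     i = 0
--     for n in nums:
--         m = n
--         for r in arr[::-1]:
--             if r[i] != " ":
--                 if m == 0:
--                     survivivors.append(r[i])
--                 else:
--                     m -= 1
--         i += 1
--     return "".join(survivivors)
-- ===== SOURCE B (Python) =====
-- def last_survivors(arr, nums):
--     # Single row-major pass bottom-up over the grid, keeping per-column state
--     # (buffer of kept chars, remaining skips), instead of one full column scan per num.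
--     state = [([], n) for n in nums]
--     for row in reversed(arr):
--         state = [(buf, m - 1) if row[i] != ' ' and m > 0
--                  else (buf + [row[i]], m) if row[i] != ' '
--                  else (buf, m)
--                  for i, (buf, m) in enumerate(state)]
--     return ''.join(c for buf, _ in state for c in buf)
-- ===== Notes on version B (the rewrite author's own statement) =====
-- stated objective: alternative
-- what changed: Interchanges the loops: instead of A's one bottom-up column scan per skip count, B makes a single row-major bottom-up pass over the grid, updating a per-column (buffer, remaining-skips) state list each row, and concatenates the per-column buffers at the end.
-- outside the precondition, e.g. on last_survivors(['ab'], [-1]): A returns '', B returns 'a'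
import Mathlib
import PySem

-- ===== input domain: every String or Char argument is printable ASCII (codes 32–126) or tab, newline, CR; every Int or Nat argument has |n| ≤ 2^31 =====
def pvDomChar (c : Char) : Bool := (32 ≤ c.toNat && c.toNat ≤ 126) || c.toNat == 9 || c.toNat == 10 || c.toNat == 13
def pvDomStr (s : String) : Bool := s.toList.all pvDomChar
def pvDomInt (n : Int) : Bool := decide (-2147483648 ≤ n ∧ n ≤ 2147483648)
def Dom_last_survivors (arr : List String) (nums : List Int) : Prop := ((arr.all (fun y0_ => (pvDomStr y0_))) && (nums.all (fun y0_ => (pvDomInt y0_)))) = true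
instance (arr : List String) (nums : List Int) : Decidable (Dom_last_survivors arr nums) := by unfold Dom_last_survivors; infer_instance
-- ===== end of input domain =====

-- B interchanges the loops: one row-major bottom-up pass carrying per-column
-- (buffer, remaining-skips) state, instead of A's one column scan per skip count
-- (alternative decomposition; same cost).

-- ===== PORT A =====
-- the inner 'for r in arr[::-1]' loop body, state (survivors, m); r[i] via pyGetD (Pre_ keeps i in range)
def last_survivors (arr : List String) (nums : List Int) : String :=
  let st := nums.foldl (fun (st : List Char × Int) n =>
    let inner := ((PySem.List.slice? arr none none (-1)).getD []).foldl
      (fun (st2 : List Char × Int) r =>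
        let c := PySem.List.pyGetD r.toList st.2 ' '
        if c ≠ ' ' then
          if st2.2 = 0 then (st2.1 ++ [c], st2.2) else (st2.1, st2.2 - 1)
        else st2) (st.1, n)
    (inner.1, st.2 + 1)) ([], 0)
  String.ofList st.1

-- ===== PORT B =====
-- the comprehension's per-cell conditional with c = row[i]: (buf, m) ↦ next (buf, m)
def pvColStep (s : List Char × Int) (c : Char) : List Char × Int :=
  if c ≠ ' ' ∧ s.2 > 0 then (s.1, s.2 - 1)
  else if c ≠ ' ' then (s.1 ++ [c], s.2)
  else s

-- one row of the pass: state = [... for i, (buf, m) in enumerate(state)]; row[i] via pyGetD (Pre_ keeps i in range)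
def pvRowStep (st : List (List Char × Int)) (row : List Char) : List (List Char × Int) :=
  (PySem.List.enumerate st 0).map (fun q => pvColStep q.2 (PySem.List.pyGetD row q.1 ' '))

def last_survivors_alt (arr : List String) (nums : List Int) : String :=
  let final := arr.reverse.foldl (fun st (r : String) => pvRowStep st r.toList)
    (nums.map (fun n => (([] : List Char), n)))
  String.ofList ((final.map (fun s => s.1)).flatten)

-- ===== PRECONDITION & SPEC =====
-- Pre_ excludes rows shorter than nums (there A raises IndexError on r[i]) and negative skip
-- counts, a meaningless corner where A silently appends nothing while B's skip counter,
-- already non-positive, keeps everything — both behaviours are accidental, neither is specified.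
def Pre_last_survivors (arr : List String) (nums : List Int) : Prop :=
  (∀ r ∈ arr, nums.length ≤ r.toList.length) ∧ (∀ n ∈ nums, 0 ≤ n)
instance (arr : List String) (nums : List Int) : Decidable (Pre_last_survivors arr nums) := by unfold Pre_last_survivors; infer_instance

def pvWitness_last_survivors : List String × List Int := (["ab", "c d"], [1, 0])

def Spec_last_survivors (arr : List String) (nums : List Int) (out : String) : Prop := out = last_survivors_alt arr nums
instance (arr : List String) (nums : List Int) (out : String) : Decidable (Spec_last_survivors arr nums out) := by unfold Spec_last_survivors; infer_instance

-- ===== CLAIM (what is proved, stated in full; the proofs are below) =====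
def Claim_equal_last_survivors : Prop := ∀ (arr : List String) (nums : List Int), Dom_last_survivors arr nums → Pre_last_survivors arr nums → Spec_last_survivors arr nums (last_survivors arr nums)

-- ===== LEMMAS AND PROOFS =====

-- A's inner scan with skip counter m ≥ 0 equals "build the column, then drop m".
theorem skip_fold (g : String → Char) (rows : List String) (m : Int) (s : List Char) (hm : 0 ≤ m) :
    (rows.foldl (fun (st2 : List Char × Int) r =>
        if g r ≠ ' ' then
          if st2.2 = 0 then (st2.1 ++ [g r], st2.2) else (st2.1, st2.2 - 1)
        else st2) (s, m)).1
      = s ++ ((rows.filterMap (fun r => if g r ≠ ' ' then some (g r) else none)).drop m.toNat) := by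
  induction rows generalizing s m with
  | nil => simp
  | cons r rest ih =>
    simp only [List.foldl_cons, List.filterMap_cons]
    by_cases hc : g r = ' '
    · rw [if_neg (by simp [hc]), if_neg (by simp [hc])]
      exact ih m s hm
    · rw [if_pos hc, if_pos hc]
      by_cases hm0 : m = 0
      · subst hm0
        rw [if_pos rfl]
        simpa using ih 0 (s ++ [g r]) le_rfl
      · have hd : m.toNat = (m - 1).toNat + 1 := by omega
        rw [if_neg hm0]
        rw [ih (m - 1) s (by omega), hd]
        simp

-- A's outer loop, generalized over the running column index and accumulator
theorem outer_fold (arr : List String) (nums : List Int) (k : Int) (acc : List Char)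
    (h : ∀ n ∈ nums, 0 ≤ n) :
    (nums.foldl (fun (st : List Char × Int) n =>
      ((arr.reverse.foldl (fun (st2 : List Char × Int) r =>
          if PySem.List.pyGetD r.toList st.2 ' ' ≠ ' ' then
            if st2.2 = 0 then (st2.1 ++ [PySem.List.pyGetD r.toList st.2 ' '], st2.2)
            else (st2.1, st2.2 - 1)
          else st2) (st.1, n)).1,
        st.2 + 1)) (acc, k)).1
    = (PySem.List.enumerate nums k).foldl (fun (acc : List Char) (p : Int × Int) =>
        acc ++ PySem.List.slice (arr.reverse.filterMap (fun row =>
          if PySem.List.pyGetD row.toList p.1 ' ' ≠ ' ' then some (PySem.List.pyGetD row.toList p.1 ' ') else none))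
          (some p.2) none) acc := by
  induction nums generalizing k acc with
  | nil => simp [PySem.List.enumerate_nil]
  | cons n rest ih =>
    have hn : 0 ≤ n := h n (List.mem_cons_self ..)
    rw [PySem.List.enumerate_cons]
    simp only [List.foldl_cons]
    rw [skip_fold (fun r => PySem.List.pyGetD r.toList k ' ') arr.reverse n acc hn,
        PySem.List.slice_from _ hn]
    exact ih (k + 1) _ (fun x hx => h x (List.mem_cons_of_mem _ hx))

-- B's column fold: the per-column skip fold equals "build the column, then drop n".
theorem col_fold (cs : List Char) (n : Int) (buf : List Char) (hn : 0 ≤ n) :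
    (cs.foldl pvColStep (buf, n)).1
      = buf ++ ((cs.filterMap (fun c => if c ≠ ' ' then some c else none)).drop n.toNat) := by
  induction cs generalizing buf n with
  | nil => simp
  | cons c rest ih =>
    simp only [List.foldl_cons, List.filterMap_cons, pvColStep]
    by_cases hc : c = ' '
    · rw [if_neg (by simp [hc]), if_neg (by simp [hc]), if_neg (by simp [hc])]
      exact ih n buf hn
    · by_cases hm : (0 : Int) < n
      · rw [if_pos ⟨hc, hm⟩, if_pos hc]
        have hd : n.toNat = (n - 1).toNat + 1 := by omega
        rw [ih (n - 1) buf (by omega), hd]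
        simp
      · have hn0 : n = 0 := by omega
        subst hn0
        rw [if_neg (by simp), if_pos hc, if_pos hc]
        simpa using ih 0 (buf ++ [c]) le_rfl

-- the row-major pass keeps the state's length
theorem foldl_rowStep_length (rows : List (List Char)) (st : List (List Char × Int)) :
    (rows.foldl pvRowStep st).length = st.length := by
  induction rows generalizing st with
  | nil => rfl
  | cons r rest ih =>
    have h1 : (pvRowStep st r).length = st.length := by
      simp [pvRowStep, PySem.List.length_enumerate]
    rw [List.foldl_cons, ih, h1]

-- loop interchange: the j-th component of the row-major pass is the column-major fold on column j
theorem foldl_rowStep_getD (rows : List (List Char)) (st : List (List Char × Int))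
    (j : Nat) (hj : j < st.length) :
    (rows.foldl pvRowStep st).getD j ([], 0)
      = rows.foldl (fun s r => pvColStep s (r.getD j ' ')) (st.getD j ([], 0)) := by
  induction rows generalizing st with
  | nil => rfl
  | cons r rest ih =>
    have h1 : (pvRowStep st r).length = st.length := by
      simp [pvRowStep, PySem.List.length_enumerate]
    have hstep : (pvRowStep st r).getD j ([], 0) = pvColStep (st.getD j ([], 0)) (r.getD j ' ') := by
      rw [List.getD_eq_getElem _ _ (by omega : j < (pvRowStep st r).length),
          List.getD_eq_getElem _ _ hj]
      simp [pvRowStep, PySem.List.getElem_enumerate, PySem.List.pyGetD_natCast]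
    rw [List.foldl_cons, List.foldl_cons, ih _ (by omega), hstep]

-- ===== VERDICT (by name: the statement is the Claim_ definition above) =====
theorem last_survivors_spec : Claim_equal_last_survivors := by
  intro arr nums _ hpre
  unfold Spec_last_survivors
  simp only [last_survivors, last_survivors_alt, PySem.List.slice?_none_none_neg_one,
    Option.getD_some]
  rw [outer_fold arr nums 0 [] hpre.2, PySem.List.foldl_append_eq_flatMap]
  -- convert B's fold over strings into a fold over rows of chars
  have hmapfold :
      arr.reverse.foldl (fun st (r : String) => pvRowStep st r.toList)
          (nums.map (fun n => (([] : List Char), n)))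
        = (arr.reverse.map String.toList).foldl pvRowStep
          (nums.map (fun n => (([] : List Char), n))) := by
    rw [List.foldl_map]
  rw [hmapfold]
  set rows := arr.reverse.map String.toList with hrows
  set init := nums.map (fun n => (([] : List Char), n)) with hinit
  have hflen : (rows.foldl pvRowStep init).length = nums.length := by
    rw [foldl_rowStep_length rows init, hinit, List.length_map]
  have hmain : (rows.foldl pvRowStep init).map (fun s => s.1)
      = (PySem.List.enumerate nums 0).map (fun p : Int × Int =>
          PySem.List.slice (arr.reverse.filterMap (fun row =>
            if PySem.List.pyGetD row.toList p.1 ' ' ≠ ' '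
            then some (PySem.List.pyGetD row.toList p.1 ' ') else none))
            (some p.2) none) := by
    apply List.ext_getElem
    · simp only [List.length_map, PySem.List.length_enumerate]
      exact hflen
    · intro j hj1 hj2
      have hjn : j < nums.length := by
        rw [List.length_map, hflen] at hj1; exact hj1
      have hjn' : j < init.length := by simpa [hinit] using hjn
      -- left side
      have hL : ((rows.foldl pvRowStep init).map (fun s => s.1))[j]
          = ((rows.map (fun r => r.getD j ' ')).foldl pvColStep ([], nums[j])).1 := by
        rw [List.getElem_map]
        have := foldl_rowStep_getD rows init j hjn'
        rw [List.getD_eq_getElem _ _ (by omega : j < (rows.foldl pvRowStep init).length)] at this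
        rw [this, List.getD_eq_getElem _ _ hjn']
        simp [hinit, List.foldl_map]
      rw [hL, List.getElem_map, PySem.List.getElem_enumerate]
      have hnn : 0 ≤ nums[j] := hpre.2 _ (List.getElem_mem _)
      rw [col_fold _ _ _ hnn, PySem.List.slice_from _ hnn]
      simp only [List.nil_append, zero_add]
      congr 1
      -- columns agree: pyGetD at natCast index = getD
      rw [hrows, List.filterMap_map, List.filterMap_map]
      apply List.filterMap_congr
      intro row _
      simp [Function.comp, PySem.List.pyGetD_natCast]
  rw [hmain, ← List.flatMap_def]
  simp
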